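-- pv_equiv track=rewrite | github.com/RuslanSayfullin/Algoritmy_Postroenie_I_Analiz | python/BoldWordsinString.py | addBoldTags
-- ===== SOURCE A (Python) =====
-- def addBoldTags(keywords, s):
--     n = len(s)
--     bold = [False] * n
--     for word in keywords:
--         start = s.find(word)
--         while start != -1:
--             for i in range(start, start + len(word)):
--                 bold[i] = True
--             start = s.find(word, start + 1)
--
--     result = []
--     i = 0
--     while i < n:
--         if bold[i]:
--             result.append("<b>")
--             while i < n and bold[i]:
--                 result.append(s[i])
--                 i += 1
--             result.append("</b>")
--         else:
--             result.append(s[i])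
--             i += 1
--     return "".join(result)
-- ===== SOURCE B (Python) =====
-- def addBoldTags(keywords, s):
--     n = len(s)
--     # position-centric: bold[i] iff some keyword occurrence covers position i
--     bold = [any(s.startswith(w, i - k)
--                 for w in keywords for k in range(len(w)) if i - k >= 0)
--             for i in range(n)]
--
--     def piece(i):
--         out = ""
--         if bold[i] and (i == 0 or not bold[i - 1]):
--             out += "<b>"
--         out += s[i]
--         if bold[i] and (i == n - 1 or not bold[i + 1]):
--             out += "</b>"
--         return out
--
--     return "".join(piece(i) for i in range(n))
-- ===== Notes on version B (the rewrite author's own statement) =====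
-- stated objective: alternative
-- what changed: Replaces the keyword-centric repeated s.find marking loop and the stateful run-emitting while loop by a position-centric coverage test (bold[i] iff some keyword occurrence covers i) and a stateless one-pass per-position piece renderer that decides tag boundaries from the neighbouring flags.
import Mathlib
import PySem

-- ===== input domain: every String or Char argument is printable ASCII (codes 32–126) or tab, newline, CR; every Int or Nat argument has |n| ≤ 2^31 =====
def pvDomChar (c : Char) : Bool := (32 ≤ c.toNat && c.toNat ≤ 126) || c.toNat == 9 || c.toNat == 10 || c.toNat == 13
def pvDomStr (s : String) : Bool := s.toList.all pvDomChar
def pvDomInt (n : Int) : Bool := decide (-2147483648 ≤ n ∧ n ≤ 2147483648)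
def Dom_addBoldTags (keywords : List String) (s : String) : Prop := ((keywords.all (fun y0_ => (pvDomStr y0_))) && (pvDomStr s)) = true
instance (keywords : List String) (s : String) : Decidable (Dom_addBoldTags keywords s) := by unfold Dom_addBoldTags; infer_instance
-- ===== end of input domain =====

-- B replaces A's repeated-find marking and run-emitting while loop by a position-centric
-- coverage test plus a stateless per-position renderer (objective: alternative, same cost class).

-- ===== PORT A =====
-- needed by pvFindLoop's termination proof: find with a start past len(s) returns -1
theorem pvFindFromPast (cs w : List Char) (k : Nat) (h : cs.length < k) :
    PySem.Chars.findFrom cs w (k : Int) none = -1 := by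
  simp [PySem.Chars.findFrom]; intro h1; omega

-- 'for i in range(start, start + len(word)): bold[i] = True' (every marked index lies inside s)
def pvMark (bold : List Bool) (st lw : Nat) : List Bool :=
  (List.range' st lw).foldl (fun b i => b.set i true) bold

-- 'while start != -1: …mark…; start = s.find(word, start + 1)'  (first call: pos = 0, i.e. s.find(word))
def pvFindLoop (cs w : List Char) (pos : Nat) (bold : List Bool) : List Bool :=
  let st := PySem.Chars.findFrom cs w (pos : Int) none
  if h : st = -1 then bold
  else pvFindLoop cs w (st.toNat + 1) (pvMark bold st.toNat w.length)
termination_by cs.length + 1 - pos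
decreasing_by
  have hle : pos ≤ cs.length := by
    by_contra hgt
    exact h (pvFindFromPast cs w pos (by omega))
  have hspec := (PySem.Chars.findFrom_natCast_spec cs w pos hle h).1
  omega

-- the inner 'while i < n and bold[i]: result.append(s[i]); i += 1' : collected chars and exit index
def pvRun (cs : List Char) (bold : List Bool) (i : Nat) : List Char × Nat :=
  if h : i < cs.length ∧ bold.getD i false then
    let p := pvRun cs bold (i + 1)
    (cs.getD i ' ' :: p.1, p.2)
  else ([], i)
termination_by cs.length - i
decreasing_by omega

theorem pvRun_le (cs : List Char) (bold : List Bool) (i : Nat) : i ≤ (pvRun cs bold i).2 := by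
  by_cases h : i < cs.length ∧ bold.getD i false = true
  · rw [pvRun, dif_pos h]
    show i ≤ (pvRun cs bold (i + 1)).2
    have := pvRun_le cs bold (i + 1)
    omega
  · rw [pvRun, dif_neg h]
termination_by cs.length - i
decreasing_by omega

theorem pvRun_gt (cs : List Char) (bold : List Bool) (i : Nat)
    (h : i < cs.length ∧ bold.getD i false = true) : i < (pvRun cs bold i).2 := by
  rw [pvRun, dif_pos h]
  show i < (pvRun cs bold (i + 1)).2
  have := pvRun_le cs bold (i + 1)
  omega

-- the outer 'while i < n: …' emit loop
def pvRender (cs : List Char) (bold : List Bool) (i : Nat) : List Char :=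
  if hi : i < cs.length then
    if hb : bold.getD i false then
      let p := pvRun cs bold i
      '<' :: 'b' :: '>' :: (p.1 ++ '<' :: '/' :: 'b' :: '>' :: pvRender cs bold p.2)
    else cs.getD i ' ' :: pvRender cs bold (i + 1)
  else []
termination_by cs.length - i
decreasing_by
  · have := pvRun_gt cs bold i ⟨hi, hb⟩; omega
  · omega

def addBoldTags (keywords : List String) (s : String) : String :=
  let cs := s.toList
  let bold := keywords.foldl (fun bold word => pvFindLoop cs word.toList 0 bold)
      (List.replicate cs.length false)
  String.mk (pvRender cs bold 0)

-- ===== PORT B =====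
-- one output piece per position: "<b>" iff a bold run starts here, the char, "</b>" iff the run ends here
def pvPiece (cs : List Char) (bold : List Bool) (i : Nat) : List Char :=
  (if bold.getD i false && (i == 0 || !bold.getD (i - 1) false) then ['<', 'b', '>'] else [])
    ++ cs.getD i ' ' ::
      (if bold.getD i false && (i == cs.length - 1 || !bold.getD (i + 1) false) then ['<', '/', 'b', '>'] else [])

def addBoldTags_alt (keywords : List String) (s : String) : String :=
  let cs := s.toList
  let bold := (List.range cs.length).map fun i =>
    keywords.any fun w => (List.range w.toList.length).any fun k =>
      decide (k ≤ i) && w.toList.isPrefixOf (cs.drop (i - k))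
  String.mk (((List.range cs.length).map (pvPiece cs bold)).flatten)

-- ===== PRECONDITION & SPEC =====
def Spec_addBoldTags (keywords : List String) (s : String) (out : String) : Prop := out = addBoldTags_alt keywords s
instance (keywords : List String) (s : String) (out : String) : Decidable (Spec_addBoldTags keywords s out) := by unfold Spec_addBoldTags; infer_instance

-- ===== CLAIM (what is proved, stated in full; the proofs are below) =====
def Claim_equal_addBoldTags : Prop := ∀ (keywords : List String) (s : String), Dom_addBoldTags keywords s → Spec_addBoldTags keywords s (addBoldTags keywords s)

-- ===== LEMMAS AND PROOFS =====

-- position i is covered by an occurrence of w in cs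
def pvCov (cs w : List Char) (i : Nat) : Prop :=
  ∃ j, j ≤ i ∧ i < j + w.length ∧ w <+: cs.drop j

theorem pvMark_succ (bold : List Bool) (st lw : Nat) :
    pvMark bold st (lw + 1) = pvMark (bold.set st true) (st + 1) lw := by
  simp [pvMark, List.range'_succ]

theorem pvMark_length (bold : List Bool) (st lw : Nat) : (pvMark bold st lw).length = bold.length := by
  induction lw generalizing st bold with
  | zero => simp [pvMark]
  | succ n ih => rw [pvMark_succ, ih]; simp

theorem pvMark_getD (bold : List Bool) (st lw i : Nat) (h : st + lw ≤ bold.length) :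
    (pvMark bold st lw).getD i false = (decide (st ≤ i ∧ i < st + lw) || bold.getD i false) := by
  induction lw generalizing st bold with
  | zero =>
    have h0 : ¬(st ≤ i ∧ i < st + 0) := by omega
    simp [pvMark, h0]
  | succ n ih =>
    rw [pvMark_succ, ih _ _ (by simpa using (by omega : st + 1 + n ≤ bold.length))]
    simp only [List.getD_eq_getElem?_getD, List.getElem?_set]
    by_cases hi : st = i
    · subst hi
      simp [show st < bold.length by omega, show st ≤ st ∧ st < st + (n + 1) by omega]
    · have h1 : (st ≤ i ∧ i < st + (n + 1)) ↔ (st + 1 ≤ i ∧ i < st + 1 + n) := by omega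
      simp [hi, h1]

theorem pvFindLoop_length (cs w : List Char) (pos : Nat) (bold : List Bool) :
    (pvFindLoop cs w pos bold).length = bold.length := by
  by_cases h : PySem.Chars.findFrom cs w (pos : Int) none = -1
  · rw [pvFindLoop, dif_pos h]
  · rw [pvFindLoop, dif_neg h]
    rw [pvFindLoop_length, pvMark_length]
termination_by cs.length + 1 - pos
decreasing_by
  have hle : pos ≤ cs.length := by
    by_contra hgt
    exact h (pvFindFromPast cs w pos (by omega))
  have hspec := (PySem.Chars.findFrom_natCast_spec cs w pos hle h).1
  omega

theorem pvFindLoop_getD (cs w : List Char) (pos : Nat) (bold : List Bool) (i : Nat)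
    (hb : bold.length = cs.length) :
    ((pvFindLoop cs w pos bold).getD i false = true
      ↔ (bold.getD i false = true ∨ ∃ j, pos ≤ j ∧ j ≤ i ∧ i < j + w.length ∧ w <+: cs.drop j)) := by
  by_cases h : PySem.Chars.findFrom cs w (pos : Int) none = -1
  · rw [pvFindLoop, dif_pos h]
    have hno : ¬ ∃ j, pos ≤ j ∧ j ≤ i ∧ i < j + w.length ∧ w <+: cs.drop j := by
      rintro ⟨j, h1, h2, h3, h4⟩
      by_cases hle : pos ≤ cs.length
      · have hn := (PySem.Chars.findFrom_natCast_eq_neg_one_iff cs w pos hle).1 h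
        apply hn
        have hp : w <+: (cs.drop pos).drop (j - pos) := by
          rwa [List.drop_drop, show pos + (j - pos) = j by omega]
        exact hp.isInfix.trans (List.drop_suffix (j - pos) (cs.drop pos)).isInfix
      · have hj : cs.length ≤ j := by omega
        have hpn : w <+: ([] : List Char) := by
          rwa [List.drop_eq_nil_of_le hj] at h4
        have hw0 : w.length = 0 := by simpa using hpn.length_le
        omega
    exact ⟨Or.inl, fun hh => hh.elim id fun he => absurd he hno⟩
  · have hle : pos ≤ cs.length := by
      by_contra hgt
      exact h (pvFindFromPast cs w pos (by omega))
    have hspec := PySem.Chars.findFrom_natCast_spec cs w pos hle h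
    set t := PySem.Chars.findFrom cs w (pos : Int) none with ht
    have htle : t.toNat ≤ cs.length := by
      have heq := PySem.Chars.findFrom_natCast cs w pos hle
      rw [← ht] at heq
      have hf1 := PySem.Chars.find_le_length (cs.drop pos) w
      have hf2 := PySem.Chars.neg_one_le_find (cs.drop pos) w
      rw [List.length_drop] at hf1
      split at heq
      · exact absurd heq h
      · omega
    have hwlen : w.length ≤ cs.length - t.toNat := by
      have := hspec.2.1.length_le
      rwa [List.length_drop] at this
    have hbound : t.toNat + w.length ≤ bold.length := by omega
    rw [pvFindLoop, dif_neg h,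
      pvFindLoop_getD cs w (t.toNat + 1) _ i (by rw [pvMark_length]; exact hb),
      pvMark_getD _ _ _ _ hbound]
    have hpt : pos ≤ t.toNat := by
      have := hspec.1
      omega
    simp only [Bool.or_eq_true, decide_eq_true_eq]
    constructor
    · rintro (((⟨hj1, hj2⟩ | hbi) | ⟨j, hj0, hj1, hj2, hj3⟩))
      · exact Or.inr ⟨t.toNat, by omega, hj1, hj2, hspec.2.1⟩
      · exact Or.inl hbi
      · exact Or.inr ⟨j, by omega, hj1, hj2, hj3⟩
    · rintro (hbi | ⟨j, hj0, hj1, hj2, hj3⟩)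
      · exact Or.inl (Or.inr hbi)
      · rcases Nat.lt_trichotomy j t.toNat with hlt | heq | hgt
        · exact absurd hj3 (hspec.2.2 j hj0 hlt)
        · subst heq
          exact Or.inl (Or.inl ⟨by omega, hj2⟩)
        · exact Or.inr ⟨j, by omega, hj1, hj2, hj3⟩
termination_by cs.length + 1 - pos
decreasing_by
  have hs := (PySem.Chars.findFrom_natCast_spec cs w pos hle h).1
  omega

theorem pvFold_getD (cs : List Char) (ws : List String) (bold : List Bool) (i : Nat)
    (hb : bold.length = cs.length) :
    ((ws.foldl (fun b w => pvFindLoop cs w.toList 0 b) bold).getD i false = true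
      ↔ (bold.getD i false = true ∨ ∃ w ∈ ws, pvCov cs w.toList i)) := by
  induction ws generalizing bold with
  | nil => simp
  | cons w ws ih =>
    rw [List.foldl_cons, ih _ (by rw [pvFindLoop_length]; exact hb),
      pvFindLoop_getD cs w.toList 0 bold i hb]
    simp only [pvCov]
    constructor
    · rintro ((hbi | ⟨j, _, hj⟩) | ⟨w', hw', hc⟩)
      · exact Or.inl hbi
      · exact Or.inr ⟨w, List.mem_cons_self, ⟨j, hj⟩⟩
      · exact Or.inr ⟨w', List.mem_cons_of_mem _ hw', hc⟩
    · rintro (hbi | ⟨w', hw', hc⟩)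
      · exact Or.inl (Or.inl hbi)
      · rcases List.mem_cons.1 hw' with rfl | hw'
        · rcases hc with ⟨j, hj⟩
          exact Or.inl (Or.inr ⟨j, Nat.zero_le _, hj⟩)
        · exact Or.inr ⟨w', hw', hc⟩

theorem pvFold_length (cs : List Char) (ws : List String) (bold : List Bool) :
    (ws.foldl (fun b w => pvFindLoop cs w.toList 0 b) bold).length = bold.length := by
  induction ws generalizing bold with
  | nil => rfl
  | cons w ws ih => rw [List.foldl_cons, ih, pvFindLoop_length]

-- the two bold arrays are equal
theorem pvBold_eq (cs : List Char) (ws : List String) :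
    ws.foldl (fun b w => pvFindLoop cs w.toList 0 b) (List.replicate cs.length false)
      = (List.range cs.length).map fun i =>
          ws.any fun w => (List.range w.toList.length).any fun k =>
            decide (k ≤ i) && w.toList.isPrefixOf (cs.drop (i - k)) := by
  have hlen : (ws.foldl (fun b w => pvFindLoop cs w.toList 0 b)
      (List.replicate cs.length false)).length = cs.length := by
    rw [pvFold_length]; simp
  apply List.ext_getElem (by simp [hlen])
  intro i h1 h2
  rw [hlen] at h1
  have hrep : (List.replicate cs.length false).getD i false = false := by
    rw [List.getD_eq_getElem?_getD, List.getElem?_replicate]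
    split <;> rfl
  have hL := pvFold_getD cs ws (List.replicate cs.length false) i (by simp)
  rw [hrep] at hL
  simp only [Bool.false_eq_true, false_or] at hL
  have hgd : (ws.foldl (fun b w => pvFindLoop cs w.toList 0 b)
      (List.replicate cs.length false)).getD i false
      = (ws.foldl (fun b w => pvFindLoop cs w.toList 0 b) (List.replicate cs.length false))[i]'(by omega) := by
    rw [List.getD_eq_getElem?_getD, List.getElem?_eq_getElem (by omega)]
    rfl
  rw [hgd] at hL
  rw [List.getElem_map, List.getElem_range]
  apply Bool.eq_iff_iff.2
  rw [hL]
  simp only [List.any_eq_true, List.mem_range, Bool.and_eq_true, decide_eq_true_eq,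
    List.isPrefixOf_iff_prefix, pvCov]
  constructor
  · rintro ⟨w, hw, j, hj1, hj2, hj3⟩
    exact ⟨w, hw, i - j, by omega, by omega, by rwa [show i - (i - j) = j by omega]⟩
  · rintro ⟨w, hw, k, hk1, hk2, hk3⟩
    exact ⟨w, hw, i - k, by omega, by omega, hk3⟩


theorem pvGetD_true_lt (l : List Bool) (j : Nat) (h : l.getD j false = true) : j < l.length := by
  by_contra hc
  rw [List.getD_eq_getElem?_getD, List.getElem?_eq_none (by omega)] at h
  simp at h

-- render equivalence, run part and outer part, by one strong induction on cs.length - i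
theorem pvRender_eq_aux (m : Nat) : ∀ (cs : List Char) (bold : List Bool) (i : Nat),
    bold.length = cs.length → cs.length - i = m →
    ((bold.getD i false = true → i < cs.length →
       (pvRun cs bold i).1 ++ '<' :: '/' :: 'b' :: '>' :: pvRender cs bold (pvRun cs bold i).2
         = cs.getD i ' ' ::
           ((if (i == cs.length - 1 || !bold.getD (i + 1) false) then ['<', '/', 'b', '>'] else [])
             ++ ((List.range' (i + 1) (cs.length - (i + 1))).map (pvPiece cs bold)).flatten))
     ∧ ((i = 0 ∨ bold.getD (i - 1) false = false ∨ bold.getD i false = false) →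
         pvRender cs bold i = ((List.range' i (cs.length - i)).map (pvPiece cs bold)).flatten)) := by
  induction m using Nat.strong_induction_on with
  | _ m ih =>
  intro cs bold i hb hm
  have hR : bold.getD i false = true → i < cs.length →
      (pvRun cs bold i).1 ++ '<' :: '/' :: 'b' :: '>' :: pvRender cs bold (pvRun cs bold i).2
        = cs.getD i ' ' ::
          ((if (i == cs.length - 1 || !bold.getD (i + 1) false) then ['<', '/', 'b', '>'] else [])
            ++ ((List.range' (i + 1) (cs.length - (i + 1))).map (pvPiece cs bold)).flatten) := by
    intro hbi hi
    rw [pvRun, dif_pos ⟨hi, hbi⟩]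
    by_cases hbn : bold.getD (i + 1) false = true
    · have hi1 : i + 1 < cs.length := by
        have := pvGetD_true_lt bold (i + 1) hbn
        omega
      have ihR := (ih (cs.length - (i + 1)) (by omega) cs bold (i + 1) hb rfl).1 hbn hi1
      have hne : (i == cs.length - 1) = false := by simp; omega
      have hne1 : ((i + 1 : Nat) == 0) = false := by simp
      rw [show cs.length - (i + 1) = (cs.length - (i + 1 + 1)) + 1 by omega, List.range'_succ,
        List.map_cons, List.flatten_cons]
      show (cs.getD i ' ' :: (pvRun cs bold (i + 1)).1) ++
          '<' :: '/' :: 'b' :: '>' :: pvRender cs bold (pvRun cs bold (i + 1)).2 = _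
      rw [List.cons_append, ihR]
      have hbnE : bold[i + 1]?.getD false = true := by rw [← List.getD_eq_getElem?_getD]; exact hbn
      have hbiE : bold[i]?.getD false = true := by rw [← List.getD_eq_getElem?_getD]; exact hbi
      simp [pvPiece, hbnE, hbiE, hne, hne1]
    · have hbn' : bold.getD (i + 1) false = false := by
        cases hv : bold.getD (i + 1) false
        · rfl
        · exact absurd hv hbn
      rw [pvRun, dif_neg (by rw [hbn']; simp)]
      have ihG := (ih (cs.length - (i + 1)) (by omega) cs bold (i + 1) hb rfl).2
        (Or.inr (Or.inr hbn'))
      show (cs.getD i ' ' :: ([] : List Char)) ++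
          '<' :: '/' :: 'b' :: '>' :: pvRender cs bold (i + 1) = _
      rw [ihG]
      have hbnE : bold[i + 1]?.getD false = false := by rw [← List.getD_eq_getElem?_getD]; exact hbn'
      simp [hbnE]
  refine ⟨hR, ?_⟩
  intro hyp
  by_cases hi : i < cs.length
  · by_cases hbi : bold.getD i false = true
    · have hopen : ((i == 0 : Bool) || !bold.getD (i - 1) false) = true := by
        rcases hyp with h0 | hprev | hfalse
        · subst h0; simp
        · rw [hprev]; simp
        · rw [hbi] at hfalse; exact absurd hfalse (by simp)
      rw [pvRender, dif_pos hi, dif_pos hbi]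
      rw [show cs.length - i = (cs.length - (i + 1)) + 1 by omega, List.range'_succ,
        List.map_cons, List.flatten_cons]
      show '<' :: 'b' :: '>' ::
          ((pvRun cs bold i).1 ++ '<' :: '/' :: 'b' :: '>' :: pvRender cs bold (pvRun cs bold i).2) = _
      rw [hR hbi hi]
      have hbiE : bold[i]?.getD false = true := by rw [← List.getD_eq_getElem?_getD]; exact hbi
      have hopenP : i = 0 ∨ bold[i - 1]?.getD false = false := by
        rcases hyp with h0 | hprev | hfalse
        · exact Or.inl h0
        · exact Or.inr (by rw [← List.getD_eq_getElem?_getD]; exact hprev)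
        · rw [hbi] at hfalse; exact absurd hfalse (by simp)
      simp [pvPiece, hbiE, hopenP]
    · have hbi' : bold.getD i false = false := by
        cases hv : bold.getD i false
        · rfl
        · exact absurd hv hbi
      rw [pvRender, dif_pos hi, dif_neg hbi]
      have ihG := (ih (cs.length - (i + 1)) (by omega) cs bold (i + 1) hb rfl).2
        (Or.inr (Or.inl (by simpa using hbi')))
      rw [show cs.length - i = (cs.length - (i + 1)) + 1 by omega, List.range'_succ,
        List.map_cons, List.flatten_cons, ihG]
      have hbiE : bold[i]?.getD false = false := by rw [← List.getD_eq_getElem?_getD]; exact hbi'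
      simp [pvPiece, hbiE]
  · rw [pvRender, dif_neg hi]
    rw [show cs.length - i = 0 by omega]
    simp

theorem pvRender_eq (cs : List Char) (bold : List Bool) (hb : bold.length = cs.length) :
    pvRender cs bold 0 = ((List.range cs.length).map (pvPiece cs bold)).flatten := by
  have h := (pvRender_eq_aux (cs.length) cs bold 0 hb (by omega)).2 (Or.inl rfl)
  simpa [List.range_eq_range'] using h

-- ===== VERDICT (by name: the statement is the Claim_ definition above) =====
theorem addBoldTags_spec : Claim_equal_addBoldTags := by
  intro keywords s _
  unfold Spec_addBoldTags addBoldTags addBoldTags_alt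
  simp only []
  rw [pvBold_eq s.toList keywords]
  rw [pvRender_eq]
  simp
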